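-- pv_equiv track=rewrite | github.com/OpenSextant/Xponents | python/opensextant/utility.py | fast_replace
-- ===== SOURCE A (Python) =====
-- def fast_replace(t, sep, sub=None):
--     """
--     Replace separators (sep) with substitute char, sub. Many-to-one substitute.
--
--     "a.b, c" SEP='.,'
--     :param t:  input text
--     :param sep: string of chars to replace
--     :param sub: replacement char
--     :return:  text with separators replaced
--     """
--     result = []
--     for ch in t:
--         if ch in sep:
--             if sub:
--                 result.append(sub)
--         else:
--             result.append(ch)
--     return ''.join(result)
-- ===== SOURCE B (Python) =====
-- import re
--
-- def fast_replace(t, sep, sub=None):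
--     repl = sub if sub else ''
--     if not sep:
--         return t
--     pattern = '[' + re.escape(sep) + ']'
--     return re.sub(pattern, lambda m: repl, t)
-- ===== Notes on version B (the rewrite author's own statement) =====
-- stated objective: idiomatic
-- what changed: Replaces the explicit per-character loop with list accumulation by a single compiled character-class regex substitution (re.sub with a lambda replacement so sub is inserted literally), guarding the empty-sep case.
import Mathlib
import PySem

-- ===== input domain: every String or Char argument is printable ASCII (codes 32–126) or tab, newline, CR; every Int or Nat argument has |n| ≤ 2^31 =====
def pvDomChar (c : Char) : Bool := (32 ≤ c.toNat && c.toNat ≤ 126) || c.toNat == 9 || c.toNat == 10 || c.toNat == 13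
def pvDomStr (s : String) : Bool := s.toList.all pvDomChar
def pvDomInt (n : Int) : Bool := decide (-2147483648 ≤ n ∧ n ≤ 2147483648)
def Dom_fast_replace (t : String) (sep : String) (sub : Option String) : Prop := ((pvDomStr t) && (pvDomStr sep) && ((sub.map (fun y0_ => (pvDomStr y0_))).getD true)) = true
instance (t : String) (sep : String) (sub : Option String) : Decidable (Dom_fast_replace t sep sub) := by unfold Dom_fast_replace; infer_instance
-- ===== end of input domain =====

-- B replaces A's explicit per-character loop with a single character-class regex substitution (idiomatic); return values proved equal on all inputs.

-- ===== PORT A =====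
-- result = []; for ch in t: if ch in sep: (if sub: result.append(sub)) else: result.append(ch); return ''.join(result)
def fast_replace (t : String) (sep : String) (sub : Option String) : String :=
  let result : List String :=
    t.toList.foldl (fun result ch =>
      if sep.toList.contains ch then
        match sub with
        | some s => if s ≠ "" then result ++ [s] else result  -- `if sub:` truthiness
        | none => result
      else result ++ [String.ofList [ch]]) []
  String.join result

-- ===== PORT B =====
-- repl = sub if sub else ''
def pvRepl (sub : Option String) : String :=
  match sub with
  | some s => if s ≠ "" then s else ""
  | none => ""

-- re.sub('[' + re.escape(sep) + ']', lambda m: repl, t): the regex engine scans t once and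
-- emits repl for each char of the class, the char itself otherwise. Ported by hand as a
-- flatMap over the chars: exact, since the escaped character class matches exactly the chars of sep.
def fast_replace_alt (t : String) (sep : String) (sub : Option String) : String :=
  let repl := pvRepl sub
  if sep = "" then t
  else String.ofList (t.toList.flatMap (fun c => if sep.toList.contains c then repl.toList else [c]))

-- ===== PRECONDITION & SPEC =====
def Spec_fast_replace (t : String) (sep : String) (sub : Option String) (out : String) : Prop := out = fast_replace_alt t sep sub
instance (t : String) (sep : String) (sub : Option String) (out : String) : Decidable (Spec_fast_replace t sep sub out) := by unfold Spec_fast_replace; infer_instance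

-- ===== CLAIM (what is proved, stated in full; the proofs are below) =====
def Claim_equal_fast_replace : Prop := ∀ (t : String) (sep : String) (sub : Option String), Dom_fast_replace t sep sub → Spec_fast_replace t sep sub (fast_replace t sep sub)

-- ===== LEMMAS AND PROOFS =====

-- the string piece A appends for one char, as a list of strings
def pvPiece (sep : String) (sub : Option String) (ch : Char) : List String :=
  if sep.toList.contains ch then
    match sub with
    | some s => if s ≠ "" then [s] else []
    | none => []
  else [String.ofList [ch]]

theorem fold_eq_flatMap (sep : String) (sub : Option String) :
    ∀ (l : List Char) (acc : List String),
      l.foldl (fun result ch =>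
        if sep.toList.contains ch then
          match sub with
          | some s => if s ≠ "" then result ++ [s] else result
          | none => result
        else result ++ [String.ofList [ch]]) acc = acc ++ l.flatMap (pvPiece sep sub) := by
  intro l
  induction l with
  | nil => intro acc; simp
  | cons c l ih =>
    intro acc
    rw [List.foldl_cons, ih, List.flatMap_cons]
    simp only [pvPiece]
    by_cases hc : c ∈ sep.toList
    · cases sub with
      | none => simp [hc]
      | some s => by_cases hs : s = "" <;> simp [hc, hs]
    · simp [hc]

theorem toList_foldl_append : ∀ (xs : List String) (x : String),
    (List.foldl (fun r s => r ++ s) x xs).toList = x.toList ++ (xs.map String.toList).flatten := by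
  intro xs
  induction xs with
  | nil => simp
  | cons y ys ih => intro x; simp [List.foldl_cons, ih]

theorem toList_join (xs : List String) : (String.join xs).toList = (xs.map String.toList).flatten := by
  simp [String.join, toList_foldl_append]

theorem pieces_flat (sep : String) (sub : Option String) :
    ∀ (l : List Char),
      ((l.flatMap (pvPiece sep sub)).map String.toList).flatten
        = l.flatMap (fun c => if sep.toList.contains c then (pvRepl sub).toList else [c]) := by
  intro l
  induction l with
  | nil => simp
  | cons c l ih =>
    simp only [List.flatMap_cons, List.map_append, List.flatten_append, ih, pvPiece, pvRepl]
    by_cases hc : c ∈ sep.toList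
    · cases sub with
      | none => simp [hc]
      | some s => by_cases hs : s = "" <;> simp [hc, hs]
    · simp [hc]

-- ===== VERDICT (by name: the statement is the Claim_ definition above) =====
theorem fast_replace_spec : Claim_equal_fast_replace := by
  intro t sep sub _
  show _ = _
  unfold fast_replace fast_replace_alt
  simp only [fold_eq_flatMap, List.nil_append]
  by_cases h : sep = ""
  · subst h
    apply String.ext
    rw [toList_join, pieces_flat]
    simp
  · simp only [if_neg h]
    apply String.ext
    rw [toList_join, pieces_flat]
    simp
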